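-- pv_equiv track=rewrite | github.com/revkelo/SOM3D-BACKEND | scripts/GeneradorStl.py | _suggest_target_faces
-- ===== SOURCE A (Python) =====
-- def _suggest_target_faces(name: str, faces_before: int) -> int:
--     n = name.lower()
--     if "vertebrae_" in n:
--         if faces_before >= 200_000: return 18_000
--         elif faces_before >= 150_000: return 16_000
--         elif faces_before >= 100_000: return 14_000
--         else: return max(10_000, faces_before // 6)
--     else:
--         if any(k in n for k in ["rib_", "sternum", "scapula"]):
--             if faces_before >= 80_000: return 6_000
--             elif faces_before >= 40_000: return 5_000
--             else: return 4_000
--         if faces_before >= 200_000: return 10_000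
--         elif faces_before >= 150_000: return 8_000
--         elif faces_before >= 100_000: return 6_500
--         else: return max(4_000, faces_before // 10)
-- ===== SOURCE B (Python) =====
-- _TIERS = {
--     "vertebrae": ((100_000, 150_000, 200_000), (None, 14_000, 16_000, 18_000), (10_000, 6)),
--     "riblike":   ((40_000, 80_000),            (4_000, 5_000, 6_000),          None),
--     "general":   ((100_000, 150_000, 200_000), (None, 6_500, 8_000, 10_000),   (4_000, 10)),
-- }
--
-- def _classify(n: str) -> str:
--     if "vertebrae_" in n:
--         return "vertebrae"
--     if any(k in n for k in ("rib_", "sternum", "scapula")):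
--         return "riblike"
--     return "general"
--
-- def _suggest_target_faces(name: str, faces_before: int) -> int:
--     cuts, vals, fallback = _TIERS[_classify(name.lower())]
--     v = vals[sum(faces_before >= c for c in cuts)]
--     if v is None:
--         floor, div = fallback
--         return max(floor, faces_before // div)
--     return v
-- ===== Notes on version B (the rewrite author's own statement) =====
-- stated objective: alternative
-- what changed: Instead of branch cascades or a first-match scan, B classifies the name, looks the group up in a module-level data table of ascending cut points and a value tuple, and indexes that tuple by the COUNT of cut points the face count meets (a bisect-style rank), with a None sentinel at rank 0 triggering the computed floor/divisor fallback.
import Mathlib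
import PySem

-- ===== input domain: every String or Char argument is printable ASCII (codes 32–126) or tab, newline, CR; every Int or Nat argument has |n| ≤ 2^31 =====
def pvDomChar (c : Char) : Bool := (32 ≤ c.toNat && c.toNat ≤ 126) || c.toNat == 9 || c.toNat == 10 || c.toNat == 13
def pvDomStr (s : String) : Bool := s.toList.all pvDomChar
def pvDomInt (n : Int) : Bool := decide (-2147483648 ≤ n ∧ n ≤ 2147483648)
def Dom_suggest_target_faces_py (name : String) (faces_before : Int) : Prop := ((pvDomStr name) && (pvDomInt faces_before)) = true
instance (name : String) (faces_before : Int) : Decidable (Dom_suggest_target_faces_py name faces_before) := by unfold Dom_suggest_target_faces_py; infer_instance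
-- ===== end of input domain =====

-- B classifies the name, looks the group up in a data table (ascending cut points,
-- value tuple, optional fallback) and indexes the value tuple by the count of cut
-- points met, with a None sentinel selecting the computed fallback (objective: alternative).

-- ===== PORT A =====
def suggest_target_faces_py (name : String) (faces_before : Int) : Int :=
  let n := PySem.Str.lower name
  if PySem.Str.isIn "vertebrae_" n then
    if faces_before ≥ 200000 then 18000
    else if faces_before ≥ 150000 then 16000
    else if faces_before ≥ 100000 then 14000
    else max 10000 (PySem.Int.floordiv faces_before 6)
  else
    if PySem.Str.isIn "rib_" n || PySem.Str.isIn "sternum" n || PySem.Str.isIn "scapula" n then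
      if faces_before ≥ 80000 then 6000
      else if faces_before ≥ 40000 then 5000
      else 4000
    else
      if faces_before ≥ 200000 then 10000
      else if faces_before ≥ 150000 then 8000
      else if faces_before ≥ 100000 then 6500
      else max 4000 (PySem.Int.floordiv faces_before 10)

-- ===== PORT B =====
-- module-level _TIERS dict: group ↦ (cuts, vals, fallback)
def pvTiers : PySem.Dict String (List Int × List (Option Int) × Option (Int × Int)) :=
  PySem.Dict.ofList
  [("vertebrae", (([100000, 150000, 200000] : List Int),
                  ([none, some 14000, some 16000, some 18000] : List (Option Int)),
                  (some (10000, 6) : Option (Int × Int)))),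
   ("riblike",   (([40000, 80000] : List Int),
                  ([some 4000, some 5000, some 6000] : List (Option Int)),
                  (none : Option (Int × Int)))),
   ("general",   (([100000, 150000, 200000] : List Int),
                  ([none, some 6500, some 8000, some 10000] : List (Option Int)),
                  (some (4000, 10) : Option (Int × Int))))]

def pvClassify (n : String) : String :=
  if PySem.Str.isIn "vertebrae_" n then "vertebrae"
  else if PySem.Str.isIn "rib_" n || PySem.Str.isIn "sternum" n || PySem.Str.isIn "scapula" n then "riblike"
  else "general"

def suggest_target_faces_py_alt (name : String) (faces_before : Int) : Int :=
  match PySem.Dict.get? pvTiers (pvClassify (PySem.Str.lower name)) with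
  | none => 0  -- unreachable: pvClassify only returns keys of pvTiers
  | some (cuts, vals, fallback) =>
    -- sum(faces_before >= c for c in cuts)
    let idx : Int := cuts.foldl (fun acc c => acc + (if faces_before ≥ c then 1 else 0)) 0
    match PySem.List.pyGet? vals idx with
    | none => 0  -- unreachable: 0 ≤ idx ≤ |cuts| < |vals|
    | some none =>
        match fallback with
        | some (floor, div) => max floor (PySem.Int.floordiv faces_before div)
        | none => 0  -- unreachable: rank-0 sentinel only occurs with a fallback
    | some (some v) => v

-- ===== PRECONDITION & SPEC =====
def Spec_suggest_target_faces_py (name : String) (faces_before : Int) (out : Int) : Prop := out = suggest_target_faces_py_alt name faces_before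
instance (name : String) (faces_before : Int) (out : Int) : Decidable (Spec_suggest_target_faces_py name faces_before out) := by unfold Spec_suggest_target_faces_py; infer_instance

-- ===== CLAIM (what is proved, stated in full; the proofs are below) =====
def Claim_equal_suggest_target_faces_py : Prop := ∀ (name : String) (faces_before : Int), Dom_suggest_target_faces_py name faces_before → Spec_suggest_target_faces_py name faces_before (suggest_target_faces_py name faces_before)

-- ===== LEMMAS AND PROOFS =====
theorem pvDictV : PySem.Dict.get? pvTiers "vertebrae" =
    some ([100000, 150000, 200000], [none, some 14000, some 16000, some 18000], some (10000, 6)) := by decide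
theorem pvDictR : PySem.Dict.get? pvTiers "riblike" =
    some ([40000, 80000], [some 4000, some 5000, some 6000], none) := by decide
theorem pvDictG : PySem.Dict.get? pvTiers "general" =
    some ([100000, 150000, 200000], [none, some 6500, some 8000, some 10000], some (4000, 10)) := by decide


-- ===== VERDICT (by name: the statement is the Claim_ definition above) =====
theorem suggest_target_faces_py_spec : Claim_equal_suggest_target_faces_py := by
  intro name faces_before _
  unfold Spec_suggest_target_faces_py suggest_target_faces_py suggest_target_faces_py_alt
  set n := PySem.Str.lower name with hn
  by_cases hv : PySem.Str.isIn "vertebrae_" n = true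
  · simp only [pvClassify, hv, if_pos, pvDictV, List.foldl]
    split_ifs <;> simp only [PySem.List.pyGet?, PySem.List.pyIdx?] <;> norm_num <;> (try omega) <;> simp
  · by_cases hr : (PySem.Str.isIn "rib_" n || PySem.Str.isIn "sternum" n || PySem.Str.isIn "scapula" n) = true
    · simp only [pvClassify, hv, hr, if_neg, if_pos, Bool.false_eq_true, not_false_iff, pvDictR, List.foldl]
      split_ifs <;> simp only [PySem.List.pyGet?, PySem.List.pyIdx?] <;> norm_num <;> (try omega) <;> simp
    · simp only [pvClassify, hv, hr, if_neg, Bool.false_eq_true, not_false_iff, pvDictG, List.foldl]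
      split_ifs <;> simp only [PySem.List.pyGet?, PySem.List.pyIdx?] <;> norm_num <;> (try omega) <;> simp
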